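-- pv_equiv track=rewrite | github.com/harness/helm-charts | tests/virtual_service_test/generate_virtualService_paths.py | group_paths_by_version
-- ===== SOURCE A (Python) =====
-- def group_paths_by_version(paths):
--     """Group paths by their version (v1, v2)"""
--     v1_paths = []
--     v2_paths = []
--
--     for path in paths:
--         if path.startswith('/v1/'):
--             v1_paths.append(path)
--         elif path.startswith('/v2/'):
--             v2_paths.append(path)
--
--     # Sort by number of segments (longest first) and then alphabetically
--     sort_key = lambda path: (-len([seg for seg in path.split('/') if seg]), path)
--
--     return {
--         'v1': sorted(v1_paths, key=sort_key),
--         'v2': sorted(v2_paths, key=sort_key)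
--     }
-- ===== SOURCE B (Python) =====
-- def group_paths_by_version(paths):
--     """Group paths by their version (v1, v2)"""
--     # Distribution (bucket) sort: group matching paths by segment depth in a
--     # dict, then emit depth groups deepest-first, each group sorted
--     # alphabetically -- no comparison sort on composite (-depth, path) keys.
--     def depth(p):
--         return len([s for s in p.split('/') if s])
--     g1, g2 = {}, {}
--     for p in paths:
--         if p.startswith('/v1/'):
--             g1.setdefault(depth(p), []).append(p)
--         elif p.startswith('/v2/'):
--             g2.setdefault(depth(p), []).append(p)
--     def flatten(g):
--         out = []
--         for d in sorted(g, reverse=True):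
--             out.extend(sorted(g[d]))
--         return out
--     return {'v1': flatten(g1), 'v2': flatten(g2)}
-- ===== Notes on version B (the rewrite author's own statement) =====
-- stated objective: alternative
-- what changed: A does two comparison sorts on the composite key (-segment count, path); B replaces the comparison sort of that composite key by a distribution (bucket) sort: it groups matching paths in a dict keyed by segment depth, then emits the depth groups deepest-first, each group sorted alphabetically.
import Mathlib
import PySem

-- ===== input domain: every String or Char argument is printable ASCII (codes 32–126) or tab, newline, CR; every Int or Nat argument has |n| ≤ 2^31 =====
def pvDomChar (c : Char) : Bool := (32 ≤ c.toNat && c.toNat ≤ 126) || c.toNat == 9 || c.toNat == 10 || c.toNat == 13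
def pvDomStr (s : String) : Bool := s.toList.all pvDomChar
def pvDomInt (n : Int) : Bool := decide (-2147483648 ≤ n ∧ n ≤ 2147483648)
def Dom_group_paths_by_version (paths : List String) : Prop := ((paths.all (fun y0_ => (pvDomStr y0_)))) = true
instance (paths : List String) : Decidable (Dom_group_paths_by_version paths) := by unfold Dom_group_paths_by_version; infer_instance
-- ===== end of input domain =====

-- B replaces A's two comparison sorts on the composite key (-segments, path) by a distribution
-- (bucket) sort: a dict keyed by segment depth, emitted deepest-first with each depth group
-- sorted alphabetically (objective: alternative).

-- number of non-empty segments: len([seg for seg in path.split('/') if seg])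
def pvDepth (path : String) : Int :=
  (((PySem.Str.split? path "/").getD []).filter (fun seg => seg ≠ "")).length

-- A's sort key first component: -len([seg for seg in path.split('/') if seg])
def pvNegSegs (path : String) : Int := -(pvDepth path)

-- ===== PORT A =====
-- A's returned dict {'v1': …, 'v2': …} is the association list in insertion order;
-- the two accumulator lists of the loop are carried as a pair.
def group_paths_by_version (paths : List String) : List (String × List String) :=
  let acc := paths.foldl (fun (acc : List String × List String) path =>
    if PySem.Str.startswith path "/v1/" then (acc.1 ++ [path], acc.2)
    else if PySem.Str.startswith path "/v2/" then (acc.1, acc.2 ++ [path])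
    else acc) ([], [])
  [("v1", PySem.List.sorted2 acc.1 pvNegSegs (fun p => p)),
   ("v2", PySem.List.sorted2 acc.2 pvNegSegs (fun p => p))]

-- ===== PORT B =====
-- Source B: distribute matching paths into a dict keyed by segment depth
-- (g.setdefault(depth(p), []).append(p) = Dict.modify with default []), then flatten:
-- for d in sorted(g, reverse=True): out.extend(sorted(g[d]))
def pvFlatten (g : PySem.Dict Int (List String)) : List String :=
  (PySem.List.sorted (PySem.Dict.keys g) (fun k => k) true).foldl
    (fun out d => out ++ PySem.List.sorted (g.getD d []) (fun p => p)) []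

def group_paths_by_version_alt (paths : List String) : List (String × List String) :=
  let gs := paths.foldl
    (fun (gs : PySem.Dict Int (List String) × PySem.Dict Int (List String)) p =>
      if PySem.Str.startswith p "/v1/" then (gs.1.modify (pvDepth p) [] (· ++ [p]), gs.2)
      else if PySem.Str.startswith p "/v2/" then (gs.1, gs.2.modify (pvDepth p) [] (· ++ [p]))
      else gs) (PySem.Dict.empty, PySem.Dict.empty)
  [("v1", pvFlatten gs.1), ("v2", pvFlatten gs.2)]

-- ===== PRECONDITION & SPEC =====
def Spec_group_paths_by_version (paths : List String) (out : List (String × List String)) : Prop := out = group_paths_by_version_alt paths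
instance (paths : List String) (out : List (String × List String)) : Decidable (Spec_group_paths_by_version paths out) := by unfold Spec_group_paths_by_version; infer_instance

-- ===== CLAIM (what is proved, stated in full; the proofs are below) =====
def Claim_equal_group_paths_by_version : Prop := ∀ (paths : List String), Dom_group_paths_by_version paths → Spec_group_paths_by_version paths (group_paths_by_version paths)

-- ===== LEMMAS AND PROOFS =====

-- the tuple key as one injective key into the lexicographic linear order on Int × String
def pvLexKey (p : String) : Lex (Int × String) := toLex (pvNegSegs p, p)

theorem pvLexKey_injective : Function.Injective pvLexKey := by
  intro a b h
  have := congrArg (fun x => (ofLex x).2) h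
  simpa [pvLexKey] using this

-- sorted2 with keys (k, id) is sorted with the single lex key
theorem sorted2_eq_sorted_lex (xs : List String) :
    PySem.List.sorted2 xs pvNegSegs (fun p => p) = PySem.List.sorted xs pvLexKey := by
  rw [PySem.List.sorted_eq_foldl_insertBy]
  show List.foldl (fun acc x => PySem.List.insertBy (fun a b =>
      decide (pvNegSegs a < pvNegSegs b) ||
        (!decide (pvNegSegs b < pvNegSegs a) && decide (a < b))) x acc) [] xs
    = List.foldl (fun acc x => PySem.List.insertBy (fun a b => decide (pvLexKey a < pvLexKey b)) x acc) [] xs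
  congr 1
  funext acc x
  congr 1
  funext a b
  by_cases h1 : pvNegSegs a < pvNegSegs b
  · simp [pvLexKey, Prod.Lex.lt_iff, h1]
  · by_cases h2 : pvNegSegs b < pvNegSegs a
    · have hne : pvNegSegs a ≠ pvNegSegs b := by omega
      simp [pvLexKey, Prod.Lex.lt_iff, h1, h2, hne]
    · have heq : pvNegSegs a = pvNegSegs b := by omega
      simp [pvLexKey, Prod.Lex.lt_iff, heq]

-- A's bucketing loop computes the two filters
theorem foldl_buckets (l : List String) (a b : List String) :
    l.foldl (fun (acc : List String × List String) p =>
      if PySem.Str.startswith p "/v1/" then (acc.1 ++ [p], acc.2)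
      else if PySem.Str.startswith p "/v2/" then (acc.1, acc.2 ++ [p])
      else acc) (a, b)
    = (a ++ l.filter (fun p => PySem.Str.startswith p "/v1/"),
       b ++ l.filter (fun p => !PySem.Str.startswith p "/v1/" && PySem.Str.startswith p "/v2/")) := by
  induction l generalizing a b with
  | nil => simp
  | cons x t ih =>
    rw [List.foldl_cons]
    by_cases h1 : PySem.Str.startswith x "/v1/" = true
    · rw [if_pos h1, ih]
      simp at h1
      simp [h1, List.append_assoc]
    · rw [if_neg h1]
      by_cases h2 : PySem.Str.startswith x "/v2/" = true
      · rw [if_pos h2, ih]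
        simp at h1 h2
        simp [h1, h2, List.append_assoc]
      · rw [if_neg h2, ih]
        simp at h1 h2
        simp [h1, h2]

-- the grouping step, named for the lemmas below
def pvGroupStep (g : PySem.Dict Int (List String)) (p : String) : PySem.Dict Int (List String) :=
  g.modify (pvDepth p) [] (· ++ [p])

-- B's dict-building loop is two independent grouping loops over the two filters
theorem bucket_fold_split (l : List String) (d1 d2 : PySem.Dict Int (List String)) :
    l.foldl (fun (gs : PySem.Dict Int (List String) × PySem.Dict Int (List String)) p =>
      if PySem.Str.startswith p "/v1/" then (gs.1.modify (pvDepth p) [] (· ++ [p]), gs.2)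
      else if PySem.Str.startswith p "/v2/" then (gs.1, gs.2.modify (pvDepth p) [] (· ++ [p]))
      else gs) (d1, d2)
    = ((l.filter (fun p => PySem.Str.startswith p "/v1/")).foldl pvGroupStep d1,
       (l.filter (fun p => !PySem.Str.startswith p "/v1/" && PySem.Str.startswith p "/v2/")).foldl
         pvGroupStep d2) := by
  induction l generalizing d1 d2 with
  | nil => simp
  | cons x t ih =>
    rw [List.foldl_cons, List.filter_cons, List.filter_cons]
    cases h1 : PySem.Str.startswith x "/v1/" with
    | true =>
      simp only [Bool.not_true, Bool.false_and, reduceIte, List.foldl_cons, pvGroupStep]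
      exact ih _ _
    | false =>
      cases h2 : PySem.Str.startswith x "/v2/" with
      | true =>
        simp only [Bool.not_false, Bool.true_and, reduceIte, List.foldl_cons, pvGroupStep]
        exact ih _ _
      | false =>
        simp only [Bool.not_false, Bool.true_and]
        exact ih _ _

-- lookup in the grouping dict: the depth-k group, in input order
theorem getD_groupFold (l : List String) (d : PySem.Dict Int (List String)) (k : Int) :
    (l.foldl pvGroupStep d).getD k [] = d.getD k [] ++ l.filter (fun p => pvDepth p == k) := by
  induction l generalizing d with
  | nil => simp
  | cons x t ih =>
    rw [List.foldl_cons, ih, List.filter_cons]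
    by_cases h : pvDepth x = k
    · subst h
      simp [pvGroupStep, PySem.Dict.getD_modify_self]
    · have h' : (pvDepth x == k) = false := by simpa using h
      rw [h']
      unfold pvGroupStep
      rw [PySem.Dict.getD_modify, if_neg (fun hh => h hh.symm)]
      simp

-- keys of the grouping dict: the distinct depths, so flatten's key list covers every path
theorem keys_groupFold (l : List String) :
    (l.foldl pvGroupStep PySem.Dict.empty).keys = PySem.Set.ofList (l.map pvDepth) := by
  unfold pvGroupStep
  rw [PySem.Dict.keys_foldl_modify_key]
  simp [PySem.Set.update_nil_left]

-- concatenating the per-depth groups over a covering Nodup key list is a permutation of the input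
theorem perm_flatMap_filter (ks : List Int) (ys : List String) (hnd : ks.Nodup)
    (hcov : ∀ y ∈ ys, pvDepth y ∈ ks) :
    (ks.flatMap (fun k => ys.filter (fun p => pvDepth p == k))).Perm ys := by
  induction ks generalizing ys with
  | nil =>
    cases ys with
    | nil => simp
    | cons y t => exact absurd (hcov y (by simp)) (by simp)
  | cons k t ih =>
    rw [List.flatMap_cons]
    have hrest : ∀ k' ∈ t, ys.filter (fun p => pvDepth p == k')
        = (ys.filter (fun p => !(pvDepth p == k))).filter (fun p => pvDepth p == k') := by
      intro k' hk'
      have hkk : k' ≠ k := fun hh => (List.nodup_cons.mp hnd).1 (hh ▸ hk')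
      rw [List.filter_filter]
      apply List.filter_congr
      intro p _
      by_cases h : pvDepth p = k'
      · have hnk : ¬(pvDepth p = k) := fun hh => hkk (by rw [← h, hh])
        simp [h]
        exact hkk
      · simp [h]
    rw [List.flatMap_congr (h := fun k' hk' => hrest k' hk')]
    have hperm := ih (ys.filter (fun p => !(pvDepth p == k))) (List.nodup_cons.mp hnd).2
      (by
        intro y hy
        rw [List.mem_filter] at hy
        have := hcov y hy.1
        simp at this hy
        rcases this with h | h
        · exact absurd h hy.2
        · exact h)
    exact (List.Perm.append_left _ hperm).trans (List.filter_append_perm _ ys)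

-- the flattened output is ordered by the lex key (-depth, path)
theorem pairwise_flatten (ks : List Int) (ys : List String)
    (hks : ks.Pairwise (fun a b => b < a)) :
    (ks.flatMap (fun k =>
      PySem.List.sorted (ys.filter (fun p => pvDepth p == k)) (fun p => p) false)).Pairwise
      (fun a b => pvLexKey a ≤ pvLexKey b) := by
  have hdepth : ∀ k, ∀ x ∈ PySem.List.sorted (ys.filter (fun p => pvDepth p == k)) (fun p => p) false,
      pvDepth x = k := by
    intro k x hx
    rw [PySem.List.mem_sorted, List.mem_filter] at hx
    simpa using hx.2
  rw [List.flatMap_def, List.pairwise_flatten]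
  refine ⟨?_, ?_⟩
  · intro l' hl'
    rw [List.mem_map] at hl'
    obtain ⟨k, hk, rfl⟩ := hl'
    have := PySem.List.sorted_pairwise (ys.filter (fun p => pvDepth p == k)) (fun p => p)
    refine this.imp_of_mem ?_
    intro a b ha hb hab
    have hda := hdepth k a ha
    have hdb := hdepth k b hb
    rw [pvLexKey, pvLexKey, Prod.Lex.le_iff]
    right
    constructor
    · simp [ofLex_toLex, pvNegSegs, hda, hdb]
    · simpa [ofLex_toLex] using hab
  · rw [List.pairwise_map]
    refine hks.imp_of_mem ?_
    intro k1 k2 hk1 hk2 hlt x hx y hy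
    have hdx := hdepth k1 x hx
    have hdy := hdepth k2 y hy
    apply le_of_lt
    rw [pvLexKey, pvLexKey, Prod.Lex.lt_iff]
    left
    simp only [ofLex_toLex, pvNegSegs, hdx, hdy]
    omega

-- main: flattening the depth-grouped dict IS sorted(ys, key=lambda p: (-depth p, p))
theorem flatten_groupFold (ys : List String) :
    pvFlatten (ys.foldl pvGroupStep PySem.Dict.empty)
      = PySem.List.sorted2 ys pvNegSegs (fun p => p) := by
  rw [sorted2_eq_sorted_lex]
  unfold pvFlatten
  rw [PySem.List.foldl_append_eq_flatMap, List.nil_append, keys_groupFold]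
  have hgetD : ∀ k, ((ys.foldl pvGroupStep PySem.Dict.empty).getD k [])
      = ys.filter (fun p => pvDepth p == k) := by
    intro k
    rw [getD_groupFold]
    simp
  have hbody : (PySem.List.sorted (PySem.Set.ofList (ys.map pvDepth)) (fun k => k) true).flatMap
        (fun d => PySem.List.sorted ((ys.foldl pvGroupStep PySem.Dict.empty).getD d []) (fun p => p) false)
      = (PySem.List.sorted (PySem.Set.ofList (ys.map pvDepth)) (fun k => k) true).flatMap
        (fun d => PySem.List.sorted (ys.filter (fun p => pvDepth p == d)) (fun p => p) false) := by
    apply List.flatMap_congr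
    intro k _
    rw [hgetD]
  rw [hbody]
  set ks := PySem.List.sorted (PySem.Set.ofList (ys.map pvDepth)) (fun k => k) true with hks
  have hksnodup : ks.Nodup :=
    ((PySem.List.sorted_perm (PySem.Set.ofList (ys.map pvDepth)) (fun k => k) true).nodup_iff).mpr
      (PySem.Set.nodup_ofList _)
  have hksdesc : ks.Pairwise (fun a b => b < a) := by
    have h1 := PySem.List.sorted_pairwise_rev (PySem.Set.ofList (ys.map pvDepth)) (fun k => k)
    exact (h1.and hksnodup).imp (fun h => lt_of_le_of_ne h.1 (fun hh => h.2 hh.symm))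
  apply PySem.List.eq_of_perm_of_pairwise_le_of_injective pvLexKey pvLexKey_injective
  · have hcov : ∀ y ∈ ys, pvDepth y ∈ ks := by
      intro y hy
      rw [hks, PySem.List.mem_sorted, PySem.Set.mem_ofList, List.mem_map]
      exact ⟨y, hy, rfl⟩
    have hsp : (ks.flatMap (fun d =>
          PySem.List.sorted (ys.filter (fun p => pvDepth p == d)) (fun p => p) false)).Perm
        (ks.flatMap (fun k => ys.filter (fun p => pvDepth p == k))) :=
      List.Perm.flatMap (List.Perm.refl ks) (fun k _ => PySem.List.sorted_perm _ _ _)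
    exact (hsp.trans (perm_flatMap_filter ks ys hksnodup hcov)).trans
      (PySem.List.sorted_perm ys pvLexKey false).symm
  · exact pairwise_flatten ks ys hksdesc
  · exact PySem.List.sorted_pairwise ys pvLexKey

-- ===== VERDICT (by name: the statement is the Claim_ definition above) =====
theorem group_paths_by_version_spec : Claim_equal_group_paths_by_version := by
  intro paths _
  unfold Spec_group_paths_by_version group_paths_by_version group_paths_by_version_alt
  rw [foldl_buckets, bucket_fold_split]
  simp only [List.nil_append, flatten_groupFold]
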